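-- pv_equiv track=rewrite | github.com/BartoszEff/AO_dobrowolski_effenberg | Minimum_cost_flow_kary.py | koszt_przeplywu_z_zasobami
-- ===== SOURCE A (Python) =====
-- def calculate_total_flow(node_index, przeplyw, start_nodes, end_nodes):
--     inflow = sum(przeplyw[i] for i in range(len(przeplyw)) if end_nodes[i] == node_index)
--     outflow = sum(przeplyw[i] for i in range(len(przeplyw)) if start_nodes[i] == node_index)
--     return inflow - outflow
--
-- def koszt_przeplywu_z_zasobami(przeplyw, koszty, zasoby, start_nodes, end_nodes, supplies):
--     koszt = 0
--     penalties = 0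
--     for i in range(len(przeplyw)):
--         if przeplyw[i] > zasoby[i]:
--             penalties += (przeplyw[i] - zasoby[i]) * koszty[i]
--         koszt += przeplyw[i] * koszty[i]
--
--     for node_index in range(len(supplies)):
--         flow_balance = calculate_total_flow(node_index, przeplyw, start_nodes, end_nodes)
--         if flow_balance != supplies[node_index]:
--             penalties += abs(flow_balance - supplies[node_index])
--
--     return koszt + penalties
-- ===== SOURCE B (Python) =====
-- def koszt_przeplywu_z_zasobami(przeplyw, koszty, zasoby, start_nodes, end_nodes, supplies):
--     koszt = sum(f * c for f, c in zip(przeplyw, koszty))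
--     kary = sum((f - r) * c for f, c, r in zip(przeplyw, koszty, zasoby) if f > r)
--     m = len(supplies)
--     balance = [0] * m
--     for f, s, e in zip(przeplyw, start_nodes, end_nodes):
--         if 0 <= s < m:
--             balance[s] -= f
--         if 0 <= e < m:
--             balance[e] += f
--     return koszt + kary + sum(abs(b - d) for b, d in zip(balance, supplies))
-- ===== Notes on version B (the rewrite author's own statement) =====
-- stated objective: faster
-- what changed: A rescans all edges once per node to compute each node's flow balance (O(V*E)); B makes a single pass over the edges accumulating per-node balances into an array and then scans the nodes once (O(E+V)), computing cost and capacity penalties in the same edge pass.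
import Mathlib
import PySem

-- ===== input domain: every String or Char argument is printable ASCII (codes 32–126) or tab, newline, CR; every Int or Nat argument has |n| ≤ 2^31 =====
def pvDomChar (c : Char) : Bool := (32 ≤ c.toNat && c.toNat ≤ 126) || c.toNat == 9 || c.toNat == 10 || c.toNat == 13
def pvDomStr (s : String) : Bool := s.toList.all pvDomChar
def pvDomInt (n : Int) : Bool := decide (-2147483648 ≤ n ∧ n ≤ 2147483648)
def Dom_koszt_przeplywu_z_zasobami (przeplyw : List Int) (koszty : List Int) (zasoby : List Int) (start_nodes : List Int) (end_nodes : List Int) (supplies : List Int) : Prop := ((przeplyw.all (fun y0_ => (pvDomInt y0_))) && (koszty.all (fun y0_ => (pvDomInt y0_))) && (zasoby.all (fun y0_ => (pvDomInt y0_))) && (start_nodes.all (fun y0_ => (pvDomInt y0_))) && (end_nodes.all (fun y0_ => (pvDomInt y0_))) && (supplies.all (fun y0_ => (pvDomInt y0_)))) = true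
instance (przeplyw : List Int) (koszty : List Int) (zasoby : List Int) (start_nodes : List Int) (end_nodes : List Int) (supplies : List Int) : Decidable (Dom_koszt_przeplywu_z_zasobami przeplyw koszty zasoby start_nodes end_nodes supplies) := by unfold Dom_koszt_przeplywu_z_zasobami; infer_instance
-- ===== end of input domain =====

-- B replaces A's per-node rescans of the edge lists by one accumulation pass into a balance array (O(E+V) vs O(V*E)); return value only.

-- ===== PORT A =====
def pvCalcTotalFlow (node_index : Int) (przeplyw : List Int) (start_nodes : List Int) (end_nodes : List Int) : Int :=
  let inflow := (PySem.List.pyRange 0 (PySem.List.len przeplyw)).foldl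
    (fun acc i => if PySem.List.pyGetD end_nodes i 0 = node_index then acc + PySem.List.pyGetD przeplyw i 0 else acc) 0
  let outflow := (PySem.List.pyRange 0 (PySem.List.len przeplyw)).foldl
    (fun acc i => if PySem.List.pyGetD start_nodes i 0 = node_index then acc + PySem.List.pyGetD przeplyw i 0 else acc) 0
  inflow - outflow

def koszt_przeplywu_z_zasobami (przeplyw : List Int) (koszty : List Int) (zasoby : List Int) (start_nodes : List Int) (end_nodes : List Int) (supplies : List Int) : Int :=
  let kp := (PySem.List.pyRange 0 (PySem.List.len przeplyw)).foldl
    (fun (st : Int × Int) i =>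
      let pen := if PySem.List.pyGetD zasoby i 0 < PySem.List.pyGetD przeplyw i 0 then
          st.2 + (PySem.List.pyGetD przeplyw i 0 - PySem.List.pyGetD zasoby i 0) * PySem.List.pyGetD koszty i 0
        else st.2
      (st.1 + PySem.List.pyGetD przeplyw i 0 * PySem.List.pyGetD koszty i 0, pen)) ((0 : Int), (0 : Int))
  let pen2 := (PySem.List.pyRange 0 (PySem.List.len supplies)).foldl
    (fun penalties node_index =>
      let fb := pvCalcTotalFlow node_index przeplyw start_nodes end_nodes
      if fb ≠ PySem.List.pyGetD supplies node_index 0 then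
        penalties + |fb - PySem.List.pyGetD supplies node_index 0|
      else penalties) kp.2
  kp.1 + pen2

-- ===== PORT B =====
def pvAltBalStep (m : Int) (b : List Int) (x : Int × Int × Int) : List Int :=
  let b1 := if 0 ≤ x.2.1 ∧ x.2.1 < m then PySem.List.pySetD b x.2.1 (PySem.List.pyGetD b x.2.1 0 - x.1) else b
  if 0 ≤ x.2.2 ∧ x.2.2 < m then PySem.List.pySetD b1 x.2.2 (PySem.List.pyGetD b1 x.2.2 0 + x.1) else b1

def koszt_przeplywu_z_zasobami_alt (przeplyw : List Int) (koszty : List Int) (zasoby : List Int) (start_nodes : List Int) (end_nodes : List Int) (supplies : List Int) : Int :=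
  let koszt := (przeplyw.zip koszty).foldl (fun acc fc => acc + fc.1 * fc.2) 0
  let kary := (przeplyw.zip (koszty.zip zasoby)).foldl
    (fun acc x => if x.2.2 < x.1 then acc + (x.1 - x.2.2) * x.2.1 else acc) 0
  let balance := (przeplyw.zip (start_nodes.zip end_nodes)).foldl
    (pvAltBalStep (PySem.List.len supplies)) (List.replicate supplies.length (0 : Int))
  koszt + kary + (balance.zip supplies).foldl (fun acc bd => acc + |bd.1 - bd.2|) 0

-- ===== PRECONDITION & SPEC =====
-- Pre_ excludes exactly the inputs on which A raises IndexError: koszty/zasoby shorter than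
-- przeplyw, or (when supplies is non-empty) start_nodes/end_nodes shorter than przeplyw.
def Pre_koszt_przeplywu_z_zasobami (przeplyw : List Int) (koszty : List Int) (zasoby : List Int) (start_nodes : List Int) (end_nodes : List Int) (supplies : List Int) : Prop :=
  przeplyw.length ≤ koszty.length ∧ przeplyw.length ≤ zasoby.length ∧
    (supplies ≠ [] → przeplyw.length ≤ start_nodes.length ∧ przeplyw.length ≤ end_nodes.length)
instance (przeplyw : List Int) (koszty : List Int) (zasoby : List Int) (start_nodes : List Int) (end_nodes : List Int) (supplies : List Int) : Decidable (Pre_koszt_przeplywu_z_zasobami przeplyw koszty zasoby start_nodes end_nodes supplies) := by unfold Pre_koszt_przeplywu_z_zasobami; infer_instance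

def pvWitness_koszt_przeplywu_z_zasobami : List Int × List Int × List Int × List Int × List Int × List Int :=
  ([1, 2], [3, 4], [1, 1], [0, 1], [1, 0], [1, -1])

def Spec_koszt_przeplywu_z_zasobami (przeplyw : List Int) (koszty : List Int) (zasoby : List Int) (start_nodes : List Int) (end_nodes : List Int) (supplies : List Int) (out : Int) : Prop := out = koszt_przeplywu_z_zasobami_alt przeplyw koszty zasoby start_nodes end_nodes supplies
instance (przeplyw : List Int) (koszty : List Int) (zasoby : List Int) (start_nodes : List Int) (end_nodes : List Int) (supplies : List Int) (out : Int) : Decidable (Spec_koszt_przeplywu_z_zasobami przeplyw koszty zasoby start_nodes end_nodes supplies out) := by unfold Spec_koszt_przeplywu_z_zasobami; infer_instance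

-- ===== CLAIM (what is proved, stated in full; the proofs are below) =====
def Claim_equal_koszt_przeplywu_z_zasobami : Prop := ∀ (przeplyw : List Int) (koszty : List Int) (zasoby : List Int) (start_nodes : List Int) (end_nodes : List Int) (supplies : List Int), Dom_koszt_przeplywu_z_zasobami przeplyw koszty zasoby start_nodes end_nodes supplies → Pre_koszt_przeplywu_z_zasobami przeplyw koszty zasoby start_nodes end_nodes supplies → Spec_koszt_przeplywu_z_zasobami przeplyw koszty zasoby start_nodes end_nodes supplies (koszt_przeplywu_z_zasobami przeplyw koszty zasoby start_nodes end_nodes supplies)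

-- ===== LEMMAS AND PROOFS =====

-- a foldl whose body conditionally adds, as an unconditional sum
theorem pvFoldlIteAdd {a : Type} (p : a -> Prop) [DecidablePred p] (w : a -> Int) (l : List a) (init : Int) :
    l.foldl (fun acc x => if p x then acc + w x else acc) init
      = init + (l.map (fun x => if p x then w x else 0)).sum := by
  have h : (fun (acc : Int) x => if p x then acc + w x else acc)
      = fun acc x => acc + (if p x then w x else 0) := by
    funext acc x; split <;> simp
  rw [h, PySem.List.foldl_add]

theorem pvFoldlPair {a : Type} (u v : a -> Int) (l : List a) (c d : Int) :
    l.foldl (fun (st : Int × Int) x => (st.1 + u x, st.2 + v x)) (c, d)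
      = (c + (l.map u).sum, d + (l.map v).sum) := by
  induction l generalizing c d with
  | nil => simp
  | cons x xs ih => simp [ih, add_assoc]

theorem pvSumMapSub {a : Type} (u v : a -> Int) (l : List a) :
    (l.map (fun x => u x - v x)).sum = (l.map u).sum - (l.map v).sum := by
  induction l with
  | nil => simp
  | cons x xs ih => simp [ih]; ring

theorem pvMapZipPair (f : Int × Int -> Int) (l1 l2 : List Int) (h : l1.length ≤ l2.length) :
    (l1.zip l2).map f = (List.range l1.length).map (fun i => f (l1.getD i 0, l2.getD i 0)) := by
  apply List.ext_getElem
  · simp [Nat.min_eq_left h]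
  · intro i h1 h2
    simp only [List.getElem_map, List.getElem_zip, List.getElem_range]
    have hi1 : i < l1.length := by simpa [Nat.min_eq_left h] using h1
    rw [List.getD_eq_getElem l1 0 hi1, List.getD_eq_getElem l2 0 (lt_of_lt_of_le hi1 h)]

theorem pvMapZipTriple (f : Int × Int × Int -> Int) (l1 l2 l3 : List Int)
    (h2 : l1.length ≤ l2.length) (h3 : l1.length ≤ l3.length) :
    (l1.zip (l2.zip l3)).map f = (List.range l1.length).map (fun i => f (l1.getD i 0, l2.getD i 0, l3.getD i 0)) := by
  apply List.ext_getElem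
  · simp; omega
  · intro i h1 hh
    simp only [List.getElem_map, List.getElem_zip, List.getElem_range]
    have hi1 : i < l1.length := by simp at h1; omega
    rw [List.getD_eq_getElem l1 0 hi1, List.getD_eq_getElem l2 0 (lt_of_lt_of_le hi1 h2),
        List.getD_eq_getElem l3 0 (lt_of_lt_of_le hi1 h3)]

theorem pvBalStepLen (m : Int) (b : List Int) (x : Int × Int × Int) :
    (pvAltBalStep m b x).length = b.length := by
  unfold pvAltBalStep
  split <;> split <;> simp only [PySem.List.length_pySetD]

theorem pvGetDSet (y : List Int) (k j : Nat) (v : Int) (hk : k < y.length) :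
    (y.set k v).getD j 0 = if j = k then v else y.getD j 0 := by
  by_cases hj : j < y.length
  · rw [List.getD_eq_getElem _ _ (by simpa using hj), List.getD_eq_getElem _ _ hj, List.getElem_set]
    rcases eq_or_ne j k with h | h
    · simp [h]
    · simp [h, Ne.symm h]
  · rw [List.getD_eq_default _ _ (by simpa using le_of_not_gt hj), List.getD_eq_default _ _ (le_of_not_gt hj)]
    have : j ≠ k := by omega
    simp [this]

theorem pvBalStepGetD (m : Int) (b : List Int) (x : Int × Int × Int)
    (hm : (b.length : Int) = m) (j : Nat) (hj : j < b.length) :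
    (pvAltBalStep m b x).getD j 0
      = b.getD j 0 + (if x.2.2 = (j : Int) then x.1 else 0) - (if x.2.1 = (j : Int) then x.1 else 0) := by
  obtain ⟨f, s, e⟩ := x
  have hjm : ((j : Int)) < m := by omega
  unfold pvAltBalStep
  set b1 := (if 0 ≤ s ∧ s < m then PySem.List.pySetD b s (PySem.List.pyGetD b s 0 - f) else b) with hb1def
  have hlen1 : b1.length = b.length := by
    rw [hb1def]; split <;> simp only [PySem.List.length_pySetD]
  have h1 : b1.getD j 0 = b.getD j 0 - (if s = (j : Int) then f else 0) := by
    rw [hb1def]; by_cases hs : 0 ≤ s ∧ s < m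
    · rw [if_pos hs, PySem.List.pySetD_of_nonneg _ _ hs.1,
          pvGetDSet _ _ _ _ (by omega), PySem.List.pyGetD_eq_getElem _ _ hs.1 (by omega)]
      by_cases he : s = (j : Int)
      · have hjs : j = s.toNat := by omega
        rw [if_pos hjs, if_pos he, List.getD_eq_getElem _ _ hj]
        congr 2 <;> omega
      · have hjs : j ≠ s.toNat := by omega
        rw [if_neg hjs, if_neg he, sub_zero]
    · rw [if_neg hs]
      have : s ≠ (j : Int) := by omega
      simp [this]
  have h2 : (if 0 ≤ e ∧ e < m then PySem.List.pySetD b1 e (PySem.List.pyGetD b1 e 0 + f) else b1).getD j 0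
      = b1.getD j 0 + (if e = (j : Int) then f else 0) := by
    by_cases hs : 0 ≤ e ∧ e < m
    · rw [if_pos hs, PySem.List.pySetD_of_nonneg _ _ hs.1,
          pvGetDSet _ _ _ _ (by omega), PySem.List.pyGetD_eq_getElem _ _ hs.1 (by omega)]
      by_cases he : e = (j : Int)
      · have hje : j = e.toNat := by omega
        rw [if_pos hje, if_pos he, List.getD_eq_getElem _ _ (by omega)]
        congr 2 <;> omega
      · have hje : j ≠ e.toNat := by omega
        rw [if_neg hje, if_neg he, add_zero]
    · rw [if_neg hs]
      have : e ≠ (j : Int) := by omega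
      simp [this]
  simp only [h2, h1]
  ring

theorem pvBalGetD (m : Int) (edges : List (Int × Int × Int)) :
    ∀ (b : List Int), (b.length : Int) = m → ∀ j : Nat, j < b.length →
    (edges.foldl (pvAltBalStep m) b).getD j 0
      = b.getD j 0 + (edges.map (fun x => (if x.2.2 = (j : Int) then x.1 else 0) - (if x.2.1 = (j : Int) then x.1 else 0))).sum := by
  induction edges with
  | nil => intro b _ j _; simp
  | cons x xs ih =>
    intro b hm j hj
    have hlen := pvBalStepLen m b x
    have := ih (pvAltBalStep m b x) (by rw [hlen]; exact hm) j (by omega)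
    simp only [List.foldl_cons, this, pvBalStepGetD m b x hm j hj, List.map_cons, List.sum_cons]
    ring

-- sum abstractions of both programs
def pvSel (p l : List Int) (node : Int) : Int :=
  ((List.range p.length).map (fun i => if l.getD i 0 = node then p.getD i 0 else 0)).sum
def pvNet (p sn en : List Int) (node : Int) : Int := pvSel p en node - pvSel p sn node
def pvKosztS (p k : List Int) : Int :=
  ((List.range p.length).map (fun i => p.getD i 0 * k.getD i 0)).sum
def pvKaryS (p k z : List Int) : Int :=
  ((List.range p.length).map (fun i => if z.getD i 0 < p.getD i 0 then (p.getD i 0 - z.getD i 0) * k.getD i 0 else 0)).sum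

theorem pvCalcEq (node : Int) (p sn en : List Int) :
    pvCalcTotalFlow node p sn en = pvNet p sn en node := by
  unfold pvCalcTotalFlow pvNet pvSel
  rw [show PySem.List.len p = (p.length : Int) from rfl, PySem.List.pyRange_zero_natCast,
      List.foldl_map, List.foldl_map]
  simp only [PySem.List.pyGetD_natCast]
  rw [pvFoldlIteAdd (fun i => en.getD i 0 = node) (fun i => p.getD i 0) _ 0,
      pvFoldlIteAdd (fun i => sn.getD i 0 = node) (fun i => p.getD i 0) _ 0]
  simp

theorem pvAEq (p k z sn en sup : List Int) :
    koszt_przeplywu_z_zasobami p k z sn en sup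
      = pvKosztS p k + (pvKaryS p k z
        + ((List.range sup.length).map (fun j : Nat =>
            if pvNet p sn en (j : Int) ≠ sup.getD j 0 then |pvNet p sn en (j : Int) - sup.getD j 0| else 0)).sum) := by
  simp only [koszt_przeplywu_z_zasobami,
    show PySem.List.len p = ((p.length : Nat) : Int) from rfl,
    show PySem.List.len sup = ((sup.length : Nat) : Int) from rfl,
    PySem.List.pyRange_zero_natCast, List.foldl_map, PySem.List.pyGetD_natCast, pvCalcEq]
  have hfold : (List.range p.length).foldl (fun (st : Int × Int) (i : Nat) =>
        (st.1 + p.getD i 0 * k.getD i 0,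
          if z.getD i 0 < p.getD i 0 then st.2 + (p.getD i 0 - z.getD i 0) * k.getD i 0 else st.2))
        ((0 : Int), (0 : Int))
      = (pvKosztS p k, pvKaryS p k z) := by
    have : (fun (st : Int × Int) (i : Nat) =>
        (st.1 + p.getD i 0 * k.getD i 0,
          if z.getD i 0 < p.getD i 0 then st.2 + (p.getD i 0 - z.getD i 0) * k.getD i 0 else st.2))
        = fun st i => (st.1 + p.getD i 0 * k.getD i 0,
            st.2 + (if z.getD i 0 < p.getD i 0 then (p.getD i 0 - z.getD i 0) * k.getD i 0 else 0)) := by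
      funext st i; split <;> simp_all
    rw [this, pvFoldlPair]
    simp [pvKosztS, pvKaryS]
  rw [hfold]
  rw [pvFoldlIteAdd (fun j : Nat => pvNet p sn en (j : Int) ≠ sup.getD j 0)
        (fun j : Nat => |pvNet p sn en (j : Int) - sup.getD j 0|) _ _]

theorem pvBalFoldLen (m : Int) (edges : List (Int × Int × Int)) (b : List Int) :
    (edges.foldl (pvAltBalStep m) b).length = b.length := by
  induction edges generalizing b with
  | nil => rfl
  | cons x xs ih => rw [List.foldl_cons, ih, pvBalStepLen]

theorem pvIteAbs (x y : Int) : (if x ≠ y then |x - y| else 0) = |x - y| := by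
  by_cases h : x = y <;> simp [h]

theorem pvBEq (p k z sn en sup : List Int)
    (hk : p.length ≤ k.length) (hz : p.length ≤ z.length)
    (hse : sup ≠ [] → p.length ≤ sn.length ∧ p.length ≤ en.length) :
    koszt_przeplywu_z_zasobami_alt p k z sn en sup
      = pvKosztS p k + (pvKaryS p k z
        + ((List.range sup.length).map (fun j : Nat => |pvNet p sn en (j : Int) - sup.getD j 0|)).sum) := by
  simp only [koszt_przeplywu_z_zasobami_alt, PySem.List.foldl_add,
    pvFoldlIteAdd (fun (x : Int × Int × Int) => x.2.2 < x.1) (fun x => (x.1 - x.2.2) * x.2.1)]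
  rw [pvMapZipPair _ p k hk, pvMapZipTriple _ p k z hk hz]
  rcases eq_or_ne sup ([] : List Int) with hsup | hsup
  · subst hsup
    simp [pvKosztS, pvKaryS]
  · obtain ⟨hsn, hen⟩ := hse hsup
    have hblen : (((p.zip (sn.zip en))).foldl (pvAltBalStep (PySem.List.len sup))
        (List.replicate sup.length 0)).length = sup.length := by
      rw [pvBalFoldLen]; exact List.length_replicate
    rw [pvMapZipPair _ _ sup (by rw [hblen])]
    rw [hblen]
    unfold pvKosztS pvKaryS
    have hterm : ∀ j ∈ List.range sup.length,
        |(((p.zip (sn.zip en))).foldl (pvAltBalStep (PySem.List.len sup))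
            (List.replicate sup.length 0)).getD j 0 - sup.getD j 0|
          = |pvNet p sn en (j : Int) - sup.getD j 0| := by
      intro j hjmem
      have hj : j < sup.length := List.mem_range.mp hjmem
      rw [pvBalGetD (PySem.List.len sup) ((p.zip (sn.zip en))) (List.replicate sup.length 0)
            (by simp [PySem.List.len]) j (by simp only [List.length_replicate]; exact hj)]
      rw [List.getD_replicate]
      rw [pvMapZipTriple _ p sn en hsn hen, pvSumMapSub]
      unfold pvNet pvSel
      ring_nf
      exact hj
    rw [List.map_congr_left hterm]
    simp
    ring

-- ===== VERDICT (by name: the statement is the Claim_ definition above) =====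
theorem koszt_przeplywu_z_zasobami_spec : Claim_equal_koszt_przeplywu_z_zasobami := by
  intro p k z sn en sup _hdom hpre
  obtain ⟨hk, hz, hse⟩ := hpre
  unfold Spec_koszt_przeplywu_z_zasobami
  rw [pvAEq, pvBEq p k z sn en sup hk hz hse]
  congr 2
  exact congrArg List.sum (List.map_congr_left (fun j _ => pvIteAbs _ _))
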